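-- pv_equiv track=rewrite | github.com/akanotoe/project_euler | project_euler.py | largest_nonmersenne_prime
-- ===== SOURCE A (Python) =====
-- def largest_nonmersenne_prime(p = 7830457):
--     num = 1
--     for power in range(p):
--         num *= 2
--         num = num % int(1e10)
--     num *= 28433
--     num += 1
--     num = num % int(1e10)
--     return int(num)
-- ===== SOURCE B (Python) =====
-- def largest_nonmersenne_prime(p = 7830457):
--     m = 10 ** 10
--     return (28433 * pow(2, p, m) + 1) % m
-- ===== Notes on version B (the rewrite author's own statement) =====
-- stated objective: faster
-- what changed: Replaces the p-step doubling loop (one multiply-and-reduce per exponent unit) with a single built-in modular exponentiation pow(2, p, 10**10), turning O(p) multiplications into O(log p).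
-- outside the precondition, e.g. on largest_nonmersenne_prime(-1): A returns 28434, B raises ValueError
import Mathlib
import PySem

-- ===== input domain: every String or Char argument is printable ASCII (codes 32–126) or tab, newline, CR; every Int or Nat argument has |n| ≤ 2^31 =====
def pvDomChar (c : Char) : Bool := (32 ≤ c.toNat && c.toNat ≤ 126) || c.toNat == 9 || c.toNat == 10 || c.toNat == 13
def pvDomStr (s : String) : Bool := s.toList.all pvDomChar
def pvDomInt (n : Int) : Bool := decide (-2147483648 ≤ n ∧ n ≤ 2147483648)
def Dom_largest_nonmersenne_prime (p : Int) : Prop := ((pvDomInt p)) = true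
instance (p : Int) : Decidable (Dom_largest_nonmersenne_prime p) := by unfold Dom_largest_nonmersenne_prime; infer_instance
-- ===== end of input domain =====

-- B replaces A's p-step doubling loop with a single modular exponentiation pow(2, p, 10**10) (objective: faster, O(log p) vs O(p)).


-- ===== PORT A =====
def largest_nonmersenne_prime (p : Int) : Int :=
  let num : Int := 1
  let num := (PySem.List.pyRange 0 p 1).foldl
    (fun num _power => PySem.Int.mod (num * 2) 10000000000) num
  let num := num * 28433
  let num := num + 1
  let num := PySem.Int.mod num 10000000000
  num

-- ===== PORT B =====
def largest_nonmersenne_prime_alt (p : Int) : Int :=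
  let m : Int := 10 ^ 10
  PySem.Int.mod (28433 * PySem.Int.powMod 2 p.toNat m + 1) m

-- ===== PRECONDITION & SPEC =====
-- Pre_ excludes negative p: there A's loop body never runs so A still returns a value,
-- while B's three-argument pow raises ValueError because the base has no modular inverse there.
def Pre_largest_nonmersenne_prime (p : Int) : Prop := 0 ≤ p
instance (p : Int) : Decidable (Pre_largest_nonmersenne_prime p) := by unfold Pre_largest_nonmersenne_prime; infer_instance
def pvWitness_largest_nonmersenne_prime : Int := 7
def Spec_largest_nonmersenne_prime (p : Int) (out : Int) : Prop := out = largest_nonmersenne_prime_alt p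
instance (p : Int) (out : Int) : Decidable (Spec_largest_nonmersenne_prime p out) := by unfold Spec_largest_nonmersenne_prime; infer_instance

-- ===== CLAIM (what is proved, stated in full; the proofs are below) =====
def Claim_equal_largest_nonmersenne_prime : Prop := ∀ (p : Int), Dom_largest_nonmersenne_prime p → Pre_largest_nonmersenne_prime p → Spec_largest_nonmersenne_prime p (largest_nonmersenne_prime p)

-- ===== LEMMAS AND PROOFS =====

-- A's doubling loop, reduced mod 10^10, computes a * 2^len mod 10^10.
theorem pv_fold_mod (l : List Int) (a : Int) :
    (l.foldl (fun n (_ : Int) => PySem.Int.mod (n * 2) 10000000000) a) % 10000000000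
      = a * 2 ^ l.length % 10000000000 := by
  induction l generalizing a with
  | nil => simp
  | cons x xs ih =>
    simp only [List.foldl_cons, List.length_cons]
    rw [ih, PySem.Int.mod_eq_emod_of_pos (by norm_num)]
    rw [Int.mul_emod, Int.emod_emod_of_dvd _ dvd_rfl, ← Int.mul_emod]
    ring_nf

theorem pv_main (p : Int) (hp : 0 ≤ p) :
    largest_nonmersenne_prime p = largest_nonmersenne_prime_alt p := by
  unfold largest_nonmersenne_prime largest_nonmersenne_prime_alt PySem.Int.powMod
  simp only []
  rw [PySem.Int.mod_eq_emod_of_pos (by norm_num), PySem.Int.mod_eq_emod_of_pos (by norm_num)]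
  have hlen : (PySem.List.pyRange 0 p 1).length = p.toNat := by
    rw [PySem.List.length_pyRange_one]; omega
  have hfold := pv_fold_mod (PySem.List.pyRange 0 p 1) 1
  rw [hlen, one_mul] at hfold
  rw [Int.add_emod, Int.mul_emod, hfold, ← Int.mul_emod, ← Int.add_emod]
  rw [PySem.Int.mod_eq_emod_of_pos (by norm_num)]
  have hM : (10:Int) ^ 10 = 10000000000 := by norm_num
  rw [hM]
  conv_rhs => rw [Int.add_emod, Int.mul_emod, Int.emod_emod_of_dvd _ dvd_rfl,
      ← Int.mul_emod, ← Int.add_emod]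
  rw [mul_comm]

-- ===== VERDICT (by name: the statement is the Claim_ definition above) =====
theorem largest_nonmersenne_prime_spec : Claim_equal_largest_nonmersenne_prime := by
  intro p _ hpre
  unfold Spec_largest_nonmersenne_prime
  exact pv_main p hpre
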